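-- pv_equiv track=rewrite | github.com/vincent-kk/Basic-Algorithm | 13. Stack/2841.py | solution
-- ===== SOURCE A (Python) =====
-- from collections import defaultdict
-- from typing import List, Tuple
--
-- def solution(N: int, P: int, code: List[Tuple[int]]):
--     fingers = defaultdict(list)
--     movement = 0
--     for s, p in code:
--         while len(fingers[s]) > 0:
--             if p < fingers[s][-1]:
--                 fingers[s].pop()
--                 movement += 1
--             else:
--                 break
--         if not (len(fingers[s]) > 0 and fingers[s][-1] == p):
--             fingers[s].append(p)
--             movement += 1
--
--     return movement
-- ===== SOURCE B (Python) =====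
-- from collections import defaultdict
-- from typing import List, Tuple
--
-- def solution(N: int, P: int, code: List[Tuple[int]]):
--     # Each per-string stack is strictly increasing, so the frets pressed above
--     # fret p are exactly the elements > p: drop them all at once with a filter
--     # instead of popping one by one in a while loop.
--     fingers = defaultdict(list)
--     movement = 0
--     for s, p in code:
--         st = fingers[s]
--         kept = [x for x in st if x <= p]
--         movement += len(st) - len(kept)
--         if not kept or kept[-1] != p:
--             kept.append(p)
--             movement += 1
--         fingers[s] = kept
--     return movement
-- ===== Notes on version B (the rewrite author's own statement) =====
-- stated objective: alternative
-- what changed: Replaces the inner while-pop loop with a single filter pass per event, relying on the proved invariant that each per-string stack is strictly increasing, so the frets released equal the elements greater than p.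
import Mathlib
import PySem

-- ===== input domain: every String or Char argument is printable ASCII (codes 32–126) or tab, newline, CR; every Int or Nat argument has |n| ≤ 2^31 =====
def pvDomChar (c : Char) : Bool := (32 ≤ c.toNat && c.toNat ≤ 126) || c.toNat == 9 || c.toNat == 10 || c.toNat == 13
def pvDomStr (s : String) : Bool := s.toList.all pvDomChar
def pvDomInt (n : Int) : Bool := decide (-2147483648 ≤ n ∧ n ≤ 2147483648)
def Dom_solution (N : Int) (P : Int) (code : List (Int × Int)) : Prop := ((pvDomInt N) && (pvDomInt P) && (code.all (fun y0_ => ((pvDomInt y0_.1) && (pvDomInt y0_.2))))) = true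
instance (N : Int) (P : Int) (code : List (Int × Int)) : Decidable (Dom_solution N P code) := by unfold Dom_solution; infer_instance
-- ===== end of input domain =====

-- B replaces A's inner while-pop loop by one filter pass per event, using the invariant
-- that each per-string stack is strictly increasing; same return value (alternative decomposition).

-- ===== PORT A =====
-- the 'while len(fingers[s]) > 0: if p < fingers[s][-1]: pop; movement += 1 else: break' loop
def popLoop (p : Int) (st : List Int) (mov : Int) : List Int × Int :=
  match h : st.getLast? with
  | none => (st, mov)
  | some t => if p < t then popLoop p st.dropLast (mov + 1) else (st, mov)
termination_by st.length
decreasing_by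
  have hne : st ≠ [] := by intro e; subst e; simp at h
  have := List.length_pos_of_ne_nil hne
  simp [List.length_dropLast]; omega

-- one iteration of A's 'for s, p in code' body (state: fingers dict, movement)
def stepA (acc : PySem.Dict Int (List Int) × Int) (sp : Int × Int) :
    PySem.Dict Int (List Int) × Int :=
  let st := acc.1.getD sp.1 []
  let r := popLoop sp.2 st acc.2
  if ¬(0 < r.1.length ∧ r.1.getLast? = some sp.2) then
    (acc.1.insert sp.1 (r.1 ++ [sp.2]), r.2 + 1)
  else
    (acc.1.insert sp.1 r.1, r.2)

def solution (N : Int) (P : Int) (code : List (Int × Int)) : Int :=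
  (code.foldl stepA ((PySem.Dict.empty : PySem.Dict Int (List Int)), (0 : Int))).2

-- ===== PORT B =====
-- one iteration of B's loop body: filter instead of repeated pops
def stepB (acc : PySem.Dict Int (List Int) × Int) (sp : Int × Int) :
    PySem.Dict Int (List Int) × Int :=
  let st := acc.1.getD sp.1 []
  let kept := st.filter (fun x => decide (x ≤ sp.2))
  let mov := acc.2 + ((st.length : Int) - (kept.length : Int))
  if kept = [] ∨ kept.getLast? ≠ some sp.2 then
    (acc.1.insert sp.1 (kept ++ [sp.2]), mov + 1)
  else
    (acc.1.insert sp.1 kept, mov)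

def solution_alt (N : Int) (P : Int) (code : List (Int × Int)) : Int :=
  (code.foldl stepB ((PySem.Dict.empty : PySem.Dict Int (List Int)), (0 : Int))).2

-- ===== PRECONDITION & SPEC =====
def Spec_solution (N : Int) (P : Int) (code : List (Int × Int)) (out : Int) : Prop := out = solution_alt N P code
instance (N : Int) (P : Int) (code : List (Int × Int)) (out : Int) : Decidable (Spec_solution N P code out) := by unfold Spec_solution; infer_instance

-- ===== CLAIM (what is proved, stated in full; the proofs are below) =====
def Claim_equal_solution : Prop := ∀ (N : Int) (P : Int) (code : List (Int × Int)), Dom_solution N P code → Spec_solution N P code (solution N P code)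

-- ===== LEMMAS AND PROOFS =====

-- last element of a strictly increasing list bounds every element
theorem last_max {l : List Int} (hp : l.Pairwise (· < ·)) {t : Int}
    (h : l.getLast? = some t) : ∀ x ∈ l, x ≤ t := by
  induction l using List.reverseRecOn with
  | nil => simp at h
  | append_singleton l b ih =>
    have hb : b = t := by simpa [List.getLast?_concat] using h
    subst hb
    intro x hx
    rcases List.mem_append.mp hx with hx' | hx'
    · have := (List.pairwise_append.mp hp).2.2 x hx' b (by simp)
      omega
    · simp at hx'; omega

theorem popLoop_eq (p : Int) (l : List Int) (mov : Int) (hp : l.Pairwise (· < ·)) :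
    popLoop p l mov =
      (l.filter (fun x => decide (x ≤ p)),
       mov + ((l.length : Int) - ((l.filter (fun x => decide (x ≤ p))).length : Int))) := by
  induction l using List.reverseRecOn generalizing mov with
  | nil =>
    rw [popLoop]; simp
  | append_singleton l b ih =>
    have hdp : l.Pairwise (· < ·) := hp.sublist (List.sublist_append_left l [b])
    rw [popLoop]
    split
    next hnone => simp at hnone
    next t' hsome =>
      have ht : b = t' := by simp at hsome; omega
      subst ht
      have hdl : (l ++ [b]).dropLast = l := by simp
      by_cases hlt : p < b
      · rw [if_pos hlt]
        rw [hdl, ih _ hdp]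
        have hfil : (l ++ [b]).filter (fun x => decide (x ≤ p)) = l.filter (fun x => decide (x ≤ p)) := by
          rw [List.filter_append]
          simp [show ¬(b ≤ p) by omega]
        rw [hfil]
        refine Prod.ext rfl ?_
        simp only [List.length_append, List.length_singleton]
        push_cast; ring
      · rw [if_neg hlt]
        have hall : ∀ x ∈ l ++ [b], x ≤ p := by
          intro x hx
          have := last_max hp hsome x hx
          omega
        have hfil : (l ++ [b]).filter (fun x => decide (x ≤ p)) = l ++ [b] := by
          apply List.filter_eq_self.mpr
          intro x hx; simpa using hall x hx
        rw [hfil]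
        refine Prod.ext rfl ?_
        simp

-- one step: the two loop bodies agree on a state whose stacks are all strictly increasing
theorem step_eq (d : PySem.Dict Int (List Int)) (mov : Int) (sp : Int × Int)
    (hinv : ∀ s, (d.getD s []).Pairwise (· < ·)) :
    stepA (d, mov) sp = stepB (d, mov) sp := by
  unfold stepA stepB
  simp only []
  rw [popLoop_eq sp.2 (d.getD sp.1 []) mov (hinv sp.1)]
  set kept := (d.getD sp.1 []).filter (fun x => decide (x ≤ sp.2)) with hk
  have hcond : (¬(0 < kept.length ∧ kept.getLast? = some sp.2)) ↔
      (kept = [] ∨ kept.getLast? ≠ some sp.2) := by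
    cases kept with
    | nil => simp
    | cons a l => simp
  by_cases hc : kept = [] ∨ kept.getLast? ≠ some sp.2
  · rw [if_pos (hcond.mpr hc), if_pos hc]
  · rw [if_neg (fun h => hc (hcond.mp h)), if_neg hc]

-- the step preserves the strictly-increasing invariant
theorem step_inv (d : PySem.Dict Int (List Int)) (mov : Int) (sp : Int × Int)
    (hinv : ∀ s, (d.getD s []).Pairwise (· < ·)) :
    ∀ s, (((stepB (d, mov) sp).1).getD s []).Pairwise (· < ·) := by
  intro s
  unfold stepB
  simp only []
  set kept := (d.getD sp.1 []).filter (fun x => decide (x ≤ sp.2)) with hk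
  have hkp : kept.Pairwise (· < ·) := (hinv sp.1).filter _
  have hkle : ∀ x ∈ kept, x ≤ sp.2 := by
    intro x hx
    have := List.of_mem_filter hx
    simpa using this
  by_cases hc : kept = [] ∨ kept.getLast? ≠ some sp.2
  · rw [if_pos hc]
    rw [PySem.Dict.getD_insert]
    split_ifs with hs
    · -- kept ++ [p] is strictly increasing
      apply List.pairwise_append.mpr
      refine ⟨hkp, by simp, ?_⟩
      intro x hx y hy
      simp at hy; subst hy
      have hle := hkle x hx
      rcases lt_or_eq_of_le hle with hlt | heq
      · exact hlt
      · -- x = p ∈ kept: then kept ≠ [] and its last is p, contradicting hc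
        exfalso
        have hx' : sp.2 ∈ kept := heq ▸ hx
        rcases hc with hnil | hlast
        · rw [hnil] at hx'; simp at hx'
        · have hne : kept ≠ [] := by intro e; rw [e] at hx'; simp at hx'
          have htl : kept.getLast? = some (kept.getLast hne) := List.getLast?_eq_some_getLast hne
          have h1 : sp.2 ≤ kept.getLast hne := last_max hkp htl _ hx'
          have h2 : kept.getLast hne ≤ sp.2 := hkle _ (List.getLast_mem hne)
          have : kept.getLast hne = sp.2 := by omega
          exact hlast (by rw [htl, this])
    · exact hinv s
  · rw [if_neg hc]
    rw [PySem.Dict.getD_insert]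
    split_ifs with hs
    · exact hkp
    · exact hinv s

theorem loop_eq (code : List (Int × Int)) :
    ∀ (d : PySem.Dict Int (List Int)) (mov : Int),
      (∀ s, (d.getD s []).Pairwise (· < ·)) →
      code.foldl stepA (d, mov) = code.foldl stepB (d, mov) := by
  induction code with
  | nil => intro d mov _; rfl
  | cons sp rest ih =>
    intro d mov hinv
    rw [List.foldl_cons, List.foldl_cons, step_eq d mov sp hinv]
    have h2 := step_inv d mov sp hinv
    exact ih _ _ h2

-- ===== VERDICT (by name: the statement is the Claim_ definition above) =====
theorem solution_spec : Claim_equal_solution := by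
  intro N P code _
  unfold Spec_solution solution solution_alt
  rw [loop_eq code PySem.Dict.empty 0 (by intro s; rw [PySem.Dict.getD_empty]; simp)]
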